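-- pv_equiv track=rewrite | github.com/N384R/zebra | Fermionic_Operator_Sorting.py | number_sort
-- ===== SOURCE A (Python) =====
-- def number_sort(operator):
--     for i in range(1, len(operator)-1):
--         if len(operator[i]) == len(operator[i+1]) and (operator[i] != '-'):
--             if len(operator[i]) == 2:
--                 if operator[i] < operator[i+1]:
--                     operator[i], operator[i+1] = operator[i+1], operator[i]
--                     operator.insert(0, '-')
--                     return number_sort(operator)
--                 return operator
--             elif len(operator[i]) == 1:
--                 if operator[i] > operator[i+1]:
--                     operator[i], operator[i+1] = operator[i+1], operator[i]
--                     operator.insert(0, '-')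
--                     return number_sort(operator)
--                 return operator
--     return operator
-- ===== SOURCE B (Python) =====
-- def number_sort(operator):
--     # Iterative re-implementation: explicit loop with a find-first scan instead of
--     # tail recursion. Mutates `operator` in place exactly like the original.
--     while True:
--         found = next((i for i in range(1, len(operator) - 1)
--                       if len(operator[i]) == len(operator[i + 1])
--                       and operator[i] != '-'
--                       and len(operator[i]) in (1, 2)), None)
--         if found is None:
--             return operator
--         x, y = operator[found], operator[found + 1]
--         if (len(x) == 2 and x < y) or (len(x) == 1 and x > y):
--             operator[found], operator[found + 1] = y, x
--             operator.insert(0, '-')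
--         else:
--             return operator
-- ===== Notes on version B (the rewrite author's own statement) =====
-- stated objective: alternative
-- what changed: Replaces A's tail recursion (restart by calling itself after each swap) with an explicit while-True loop that first locates the first qualifying adjacent pair via a find-first scan and then dispatches (swap-and-prepend or return), keeping the same in-place mutation.
import Mathlib
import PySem

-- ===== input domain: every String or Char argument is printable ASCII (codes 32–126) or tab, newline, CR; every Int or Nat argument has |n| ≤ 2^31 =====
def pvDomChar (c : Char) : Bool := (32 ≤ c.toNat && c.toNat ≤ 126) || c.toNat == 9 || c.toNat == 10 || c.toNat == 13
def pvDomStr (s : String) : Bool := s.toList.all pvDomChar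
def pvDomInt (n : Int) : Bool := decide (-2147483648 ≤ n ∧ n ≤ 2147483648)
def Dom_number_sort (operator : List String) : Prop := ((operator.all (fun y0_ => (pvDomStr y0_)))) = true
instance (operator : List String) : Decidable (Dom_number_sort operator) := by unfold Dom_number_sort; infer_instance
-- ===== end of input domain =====

-- ===== PORT A =====
-- B replaces A's tail recursion (restart by self-call after each swap) with an explicit
-- while-loop that finds the first qualifying pair and then dispatches; both Pythons mutate
-- the argument list in place identically, the equivalence proved is about the return value.
-- A's for-loop over i (one pass): inl = a `return`, inr = swap happened, recurse on the new list.
-- k counts the remaining loop iterations (started at op.length, more than the loop can use).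
def numberSortPassA (k : Nat) (op : List String) (i : Nat) : List String ⊕ List String :=
  match k with
  | 0 => Sum.inl op
  | k + 1 =>
    if i + 1 < op.length then
      let x := op.getD i ""
      let y := op.getD (i + 1) ""
      if x.length = y.length ∧ x ≠ "-" then
        if x.length = 2 then
          if x < y then Sum.inr ("-" :: (op.set i y).set (i + 1) x) else Sum.inl op
        else if x.length = 1 then
          if y < x then Sum.inr ("-" :: (op.set i y).set (i + 1) x) else Sum.inl op
        else numberSortPassA k op (i + 1)
      else numberSortPassA k op (i + 1)
    else Sum.inl op

-- A's tail recursion, with fuel (each self-call does one swap; swaps never exceed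
-- the initial number of adjacent-comparable inversions, < length^2, so the fuel is ample)
def numberSortGoA : Nat → List String → List String
  | 0, op => op
  | f + 1, op =>
    match numberSortPassA op.length op 1 with
    | Sum.inl r => r
    | Sum.inr new => numberSortGoA f new

def number_sort (operator : List String) : List String :=
  numberSortGoA (operator.length * operator.length + 1) operator

-- ===== PORT B =====
-- find-first scan: index of first adjacent pair with equal lengths (1 or 2) and left token ≠ '-'
def numberSortFind (k : Nat) (op : List String) (i : Nat) : Option Nat :=
  match k with
  | 0 => none
  | k + 1 =>
    if i + 1 < op.length then
      if (op.getD i "").length = (op.getD (i + 1) "").length ∧ op.getD i "" ≠ "-" ∧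
          ((op.getD i "").length = 1 ∨ (op.getD i "").length = 2) then
        some i
      else numberSortFind k op (i + 1)
    else none

-- the `while True` loop: find, then dispatch (swap-and-prepend, or return); same ample fuel
def numberSortLoopB : Nat → List String → List String
  | 0, op => op
  | f + 1, op =>
    match numberSortFind op.length op 1 with
    | none => op
    | some j =>
      let x := op.getD j ""
      let y := op.getD (j + 1) ""
      if (x.length = 2 ∧ x < y) ∨ (x.length = 1 ∧ y < x) then
        numberSortLoopB f ("-" :: (op.set j y).set (j + 1) x)
      else op

def number_sort_alt (operator : List String) : List String :=
  numberSortLoopB (operator.length * operator.length + 1) operator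

-- ===== PRECONDITION & SPEC =====
def Spec_number_sort (operator : List String) (out : List String) : Prop := out = number_sort_alt operator
instance (operator : List String) (out : List String) : Decidable (Spec_number_sort operator out) := by unfold Spec_number_sort; infer_instance

-- ===== CLAIM (what is proved, stated in full; the proofs are below) =====
def Claim_equal_number_sort : Prop := ∀ (operator : List String), Dom_number_sort operator → Spec_number_sort operator (number_sort operator)

-- ===== LEMMAS AND PROOFS =====
-- one pass of A = find-first, then dispatch (the bridge between the two decompositions)
theorem passA_eq_find (k : Nat) (op : List String) (i : Nat) :
    numberSortPassA k op i =
      (match numberSortFind k op i with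
        | none => Sum.inl op
        | some j =>
          if ((op.getD j "").length = 2 ∧ op.getD j "" < op.getD (j + 1) "") ∨
              ((op.getD j "").length = 1 ∧ op.getD (j + 1) "" < op.getD j "") then
            Sum.inr ("-" :: (op.set j (op.getD (j + 1) "")).set (j + 1) (op.getD j ""))
          else Sum.inl op) := by
  induction k generalizing i with
  | zero => rfl
  | succ k ih =>
    by_cases hb : i + 1 < op.length
    · by_cases hq : (op.getD i "").length = (op.getD (i + 1) "").length ∧ op.getD i "" ≠ "-"
      · by_cases h2 : (op.getD i "").length = 2
        · have hf : numberSortFind (k + 1) op i = some i := by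
            simp only [numberSortFind, if_pos hb]
            exact if_pos ⟨hq.1, hq.2, Or.inr h2⟩
          have hL : numberSortPassA (k + 1) op i =
              if op.getD i "" < op.getD (i + 1) "" then
                Sum.inr ("-" :: (op.set i (op.getD (i + 1) "")).set (i + 1) (op.getD i ""))
              else Sum.inl op := by
            simp only [numberSortPassA, if_pos hb]
            rw [if_pos hq, if_pos h2]
          simp only [hf, hL]
          by_cases hlt : op.getD i "" < op.getD (i + 1) ""
          · rw [if_pos hlt, if_pos (Or.inl ⟨h2, hlt⟩)]
          · rw [if_neg hlt, if_neg]
            rintro (⟨_, h⟩ | ⟨h1, _⟩)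
            · exact hlt h
            · rw [h2] at h1; exact absurd h1 (by norm_num)
        · by_cases h1 : (op.getD i "").length = 1
          · have hf : numberSortFind (k + 1) op i = some i := by
              simp only [numberSortFind, if_pos hb]
              exact if_pos ⟨hq.1, hq.2, Or.inl h1⟩
            have hL : numberSortPassA (k + 1) op i =
                if op.getD (i + 1) "" < op.getD i "" then
                  Sum.inr ("-" :: (op.set i (op.getD (i + 1) "")).set (i + 1) (op.getD i ""))
                else Sum.inl op := by
              simp only [numberSortPassA, if_pos hb]
              rw [if_pos hq, if_neg h2, if_pos h1]
            simp only [hf, hL]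
            by_cases hlt : op.getD (i + 1) "" < op.getD i ""
            · rw [if_pos hlt, if_pos (Or.inr ⟨h1, hlt⟩)]
            · rw [if_neg hlt, if_neg]
              rintro (⟨h2', _⟩ | ⟨_, h⟩)
              · exact h2 h2'
              · exact hlt h
          · have hf : numberSortFind (k + 1) op i = numberSortFind k op (i + 1) := by
              simp only [numberSortFind, if_pos hb]
              exact if_neg (fun h => by rcases h with ⟨_, _, (hc | hc)⟩ <;> [exact h1 hc; exact h2 hc])
            have hL : numberSortPassA (k + 1) op i = numberSortPassA k op (i + 1) := by
              simp only [numberSortPassA, if_pos hb]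
              rw [if_pos hq, if_neg h2, if_neg h1]
            rw [hL, hf]
            exact ih (i + 1)
      · have hf : numberSortFind (k + 1) op i = numberSortFind k op (i + 1) := by
          simp only [numberSortFind, if_pos hb]
          exact if_neg (fun h => hq ⟨h.1, h.2.1⟩)
        have hL : numberSortPassA (k + 1) op i = numberSortPassA k op (i + 1) := by
          simp only [numberSortPassA, if_pos hb]
          rw [if_neg hq]
        rw [hL, hf]
        exact ih (i + 1)
    · have hf : numberSortFind (k + 1) op i = none := by
        simp only [numberSortFind, if_neg hb]
      have hL : numberSortPassA (k + 1) op i = Sum.inl op := by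
        simp only [numberSortPassA, if_neg hb]
      simp only [hf, hL]

theorem goA_eq_loopB (fuel : Nat) (op : List String) :
    numberSortGoA fuel op = numberSortLoopB fuel op := by
  induction fuel generalizing op with
  | zero => rfl
  | succ f ih =>
    simp only [numberSortGoA, numberSortLoopB, passA_eq_find]
    cases hf : numberSortFind op.length op 1 with
    | none => rfl
    | some j =>
      by_cases hd : ((op.getD j "").length = 2 ∧ op.getD j "" < op.getD (j + 1) "") ∨
          ((op.getD j "").length = 1 ∧ op.getD (j + 1) "" < op.getD j "")
      · simp only [if_pos hd]
        exact ih _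
      · simp only [if_neg hd]

-- ===== VERDICT (by name: the statement is the Claim_ definition above) =====
theorem number_sort_spec : Claim_equal_number_sort := by
  intro operator _
  unfold Spec_number_sort number_sort number_sort_alt
  exact goA_eq_loopB _ _
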